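-- pv_equiv track=rewrite | github.com/jamesalv/HateDeRC | preprocessing.py | create_text_segment
-- ===== SOURCE A (Python) =====
-- from typing import List, Tuple
--
-- def create_text_segment(
--     text_tokens: List[str], rationale_mask: List[int]
-- ) -> List[Tuple[List[str], int]]:
--     """
--     Process a rationale mask to identify contiguous segments of highlighted text.
--     Then create a segmented representation of the tokens
--
--     Args:
--         text_tokens: Original text tokens
--         mask: Binary mask where 1 indicates a highlighted token (this consists of mask from 3 annotators)
--
--     Returns:
--         A list of tuples (text segment, mask value)
--     """
--     # Handle case where mask is empty (no rationale provided), usually this is normal classification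
--     mask = rationale_mask
--
--     # for mask in all_rationale_mask:
--     # Find breakpoints (transitions between highlighted/1 and non-highlighted/0)
--     breakpoints = []
--     mask_values = []
--
--     # Always start with position 0
--     breakpoints.append(0)
--     mask_values.append(mask[0])
--
--     # Find transitions in the mask
--     for i in range(1, len(mask)):
--         if mask[i] != mask[i - 1]:
--             breakpoints.append(i)
--             mask_values.append(mask[i])
--
--     # Always end with the length of the text
--     if breakpoints[-1] != len(mask):
--         breakpoints.append(len(mask))
--
--     # Create segments based on breakpoints
--     segments = []
--     for i in range(len(breakpoints) - 1):
--         start = breakpoints[i]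
--         end = breakpoints[i + 1]
--         segments.append((text_tokens[start:end], mask_values[i]))
--
--     return segments
-- ===== SOURCE B (Python) =====
-- from typing import List, Tuple
--
-- def create_text_segment(
--     text_tokens: List[str], rationale_mask: List[int]
-- ) -> List[Tuple[List[str], int]]:
--     # Single forward pass: emit a segment at each transition, no breakpoint table.
--     mask = rationale_mask
--     current = mask[0]
--     start = 0
--     segments = []
--     for i in range(1, len(mask)):
--         if mask[i] != current:
--             segments.append((text_tokens[start:i], current))
--             start = i
--             current = mask[i]
--     segments.append((text_tokens[start:len(mask)], current))
--     return segments
-- ===== Notes on version B (the rewrite author's own statement) =====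
-- stated objective: simpler
-- what changed: Replaced A's two-phase construction (build breakpoint and mask-value tables, then a second loop slicing between consecutive breakpoints) with a single forward pass that emits each segment directly at every transition; Pre_ excludes only the empty mask, on which both raise IndexError.
import Mathlib
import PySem

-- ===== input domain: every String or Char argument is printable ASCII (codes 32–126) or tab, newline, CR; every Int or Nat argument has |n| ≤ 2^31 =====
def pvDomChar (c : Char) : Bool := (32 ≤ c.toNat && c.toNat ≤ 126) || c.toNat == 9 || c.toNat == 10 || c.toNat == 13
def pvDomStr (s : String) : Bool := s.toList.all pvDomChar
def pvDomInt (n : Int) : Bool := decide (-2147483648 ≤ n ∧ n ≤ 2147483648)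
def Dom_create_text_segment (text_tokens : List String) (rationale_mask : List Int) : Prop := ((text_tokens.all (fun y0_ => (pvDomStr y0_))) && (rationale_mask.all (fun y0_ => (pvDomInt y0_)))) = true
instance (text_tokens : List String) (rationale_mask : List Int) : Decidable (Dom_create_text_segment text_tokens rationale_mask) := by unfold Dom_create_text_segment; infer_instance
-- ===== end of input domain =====

-- B replaces A's two-phase breakpoint/mask-value table construction by a single forward
-- pass that emits each segment at every transition (simpler decomposition, same cost).


-- ===== PORT A =====
-- Literal transliteration of A: build breakpoints/mask_values over range(1, len(mask)),
-- append len(mask) if breakpoints[-1] differs, then slice between consecutive breakpoints.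
def create_text_segment (text_tokens : List String) (rationale_mask : List Int) : List (List String × Int) :=
  match rationale_mask with
  | [] => []  -- Python raises IndexError on mask[0]; excluded by Pre_
  | m0 :: _ =>
    let mask := rationale_mask
    let bm : List Int × List Int :=
      (PySem.List.pyRange 1 (mask.length : Int) 1).foldl
        (fun st i =>
          if PySem.List.pyGetD mask i 0 ≠ PySem.List.pyGetD mask (i - 1) 0 then
            (st.1 ++ [i], st.2 ++ [PySem.List.pyGetD mask i 0])
          else st)
        ([0], [m0])
    let breakpoints :=
      if PySem.List.pyGetD bm.1 (-1) 0 ≠ (mask.length : Int) then bm.1 ++ [(mask.length : Int)]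
      else bm.1
    (PySem.List.pyRange 0 ((breakpoints.length : Int) - 1) 1).foldl
      (fun segs i =>
        segs ++ [(PySem.List.slice text_tokens (some (PySem.List.pyGetD breakpoints i 0))
                    (some (PySem.List.pyGetD breakpoints (i + 1) 0)),
                  PySem.List.pyGetD bm.2 i 0)])
      []

-- ===== PORT B =====
-- Literal transliteration of B: one pass over range(1, len(mask)) with state
-- (segments, start, current), emitting a segment at each transition, then the final run.
def create_text_segment_alt (text_tokens : List String) (rationale_mask : List Int) : List (List String × Int) :=
  match rationale_mask with
  | [] => []  -- Python raises IndexError on mask[0]; excluded by Pre_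
  | m0 :: _ =>
    let mask := rationale_mask
    let fin : List (List String × Int) × Int × Int :=
      (PySem.List.pyRange 1 (mask.length : Int) 1).foldl
        (fun st i =>
          if PySem.List.pyGetD mask i 0 ≠ st.2.2 then
            (st.1 ++ [(PySem.List.slice text_tokens (some st.2.1) (some i), st.2.2)],
             i, PySem.List.pyGetD mask i 0)
          else st)
        ([], 0, m0)
    fin.1 ++ [(PySem.List.slice text_tokens (some fin.2.1) (some (mask.length : Int)), fin.2.2)]

-- ===== PRECONDITION & SPEC =====
-- Pre_ excludes only the empty mask, on which Python A (and B) raise IndexError at mask[0].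
def Pre_create_text_segment (text_tokens : List String) (rationale_mask : List Int) : Prop :=
  rationale_mask ≠ []
instance (text_tokens : List String) (rationale_mask : List Int) : Decidable (Pre_create_text_segment text_tokens rationale_mask) := by unfold Pre_create_text_segment; infer_instance

def pvWitness_create_text_segment : List String × List Int := (["a", "b", "c"], [1, 1, 0])

def Spec_create_text_segment (text_tokens : List String) (rationale_mask : List Int) (out : List (List String × Int)) : Prop := out = create_text_segment_alt text_tokens rationale_mask
instance (text_tokens : List String) (rationale_mask : List Int) (out : List (List String × Int)) : Decidable (Spec_create_text_segment text_tokens rationale_mask out) := by unfold Spec_create_text_segment; infer_instance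

-- ===== CLAIM (what is proved, stated in full; the proofs are below) =====
def Claim_equal_create_text_segment : Prop := ∀ (text_tokens : List String) (rationale_mask : List Int), Dom_create_text_segment text_tokens rationale_mask → Pre_create_text_segment text_tokens rationale_mask → Spec_create_text_segment text_tokens rationale_mask (create_text_segment text_tokens rationale_mask)

-- ===== LEMMAS AND PROOFS =====

-- Segments between consecutive breakpoints paired with mask values (proof-side spec of A's final loop).
def zipSegs (tt : List String) : List Int → List Int → List (List String × Int)
  | b1 :: b2 :: bs, v :: vs =>
      (PySem.List.slice tt (some b1) (some b2), v) :: zipSegs tt (b2 :: bs) vs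
  | _, _ => []

lemma zipSegs_snoc (tt : List String) (bps : List Int) :
    ∀ (mvs : List Int), bps.length = mvs.length → ∀ (x e v : Int),
    zipSegs tt ((bps ++ [x]) ++ [e]) (mvs ++ [v])
      = zipSegs tt (bps ++ [x]) mvs ++ [(PySem.List.slice tt (some x) (some e), v)] := by
  induction bps with
  | nil =>
    intro mvs h x e v
    have : mvs = [] := List.eq_nil_of_length_eq_zero h.symm
    subst this
    simp [zipSegs]
  | cons b bps' ih =>
    intro mvs h x e v
    match mvs with
    | [] => simp at h
    | m :: mvs' =>
      simp only [List.length_cons, Nat.add_right_cancel_iff] at h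
      match bps' with
      | [] =>
        have : mvs' = [] := List.eq_nil_of_length_eq_zero h.symm
        subst this
        simp [zipSegs]
      | b2 :: bps'' =>
        have hrec := ih mvs' h x e v
        simp only [List.cons_append, List.append_assoc, List.nil_append] at hrec ⊢
        simp only [zipSegs, List.cons_append]
        exact congrArg (List.cons _) hrec

lemma map_range_eq_zipSegs (tt : List String) :
    ∀ (mvs bps : List Int), bps.length = mvs.length + 1 →
    (List.range mvs.length).map
        (fun j => (PySem.List.slice tt (some (bps.getD j 0)) (some (bps.getD (j + 1) 0)),
                   mvs.getD j 0))
      = zipSegs tt bps mvs := by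
  intro mvs
  induction mvs with
  | nil =>
    intro bps h
    match bps with
    | [b] => simp [zipSegs]
  | cons v vs ih =>
    intro bps h
    match bps with
    | b1 :: b2 :: bs =>
      simp only [List.length_cons, Nat.add_right_cancel_iff] at h
      rw [List.length_cons, List.range_succ_eq_map, List.map_cons, List.map_map]
      simp only [Function.comp_def, List.getD_cons_zero, List.getD_cons_succ, zipSegs]
      congr 1
      exact ih (b2 :: bs) (by simpa using h)

-- A's final loop, as a named function of the finished tables.
def finalFold (tt : List String) (bps mvs : List Int) : List (List String × Int) :=
  (PySem.List.pyRange 0 ((bps.length : Int) - 1) 1).foldl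
    (fun segs i =>
      segs ++ [(PySem.List.slice tt (some (PySem.List.pyGetD bps i 0))
                  (some (PySem.List.pyGetD bps (i + 1) 0)),
                PySem.List.pyGetD mvs i 0)])
    []

lemma final_loop_eq (tt : List String) (bps mvs : List Int) (h : bps.length = mvs.length + 1) :
    finalFold tt bps mvs = zipSegs tt bps mvs := by
  unfold finalFold
  have h1 : ((bps.length : Int) - 1) = ((mvs.length : Nat) : Int) := by rw [h]; push_cast; ring
  rw [h1, PySem.List.pyRange_one 0 ((mvs.length : Nat) : Int)]
  have h2 : (((mvs.length : Nat) : Int) - 0).toNat = mvs.length := by omega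
  rw [h2, List.foldl_map, PySem.List.foldl_append_singleton_eq_map]
  rw [← map_range_eq_zipSegs tt mvs bps h]
  simp only [List.nil_append]
  apply List.map_congr_left
  intro j hj
  rw [show ((0 : Int) + (j : Int)) = ((j : Nat) : Int) from by ring]
  rw [show ((j : Int) + 1) = ((j + 1 : Nat) : Int) from by push_cast; ring]
  rw [PySem.List.pyGetD_natCast, PySem.List.pyGetD_natCast, PySem.List.pyGetD_natCast]

-- The two loop bodies, named (identical to the ports' lambdas).
def stepA (mask : List Int) (st : List Int × List Int) (i : Int) : List Int × List Int :=
  if PySem.List.pyGetD mask i 0 ≠ PySem.List.pyGetD mask (i - 1) 0 then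
    (st.1 ++ [i], st.2 ++ [PySem.List.pyGetD mask i 0])
  else st

def stepB (tt : List String) (mask : List Int)
    (st : List (List String × Int) × Int × Int) (i : Int) :
    List (List String × Int) × Int × Int :=
  if PySem.List.pyGetD mask i 0 ≠ st.2.2 then
    (st.1 ++ [(PySem.List.slice tt (some st.2.1) (some i), st.2.2)], i, PySem.List.pyGetD mask i 0)
  else st

def Afold (m0 : Int) (rest : List Int) (k : Nat) : List Int × List Int :=
  (PySem.List.pyRange 1 (k : Int) 1).foldl (stepA (m0 :: rest)) ([0], [m0])

def Bfold (tt : List String) (m0 : Int) (rest : List Int) (k : Nat) :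
    List (List String × Int) × Int × Int :=
  (PySem.List.pyRange 1 (k : Int) 1).foldl (stepB tt (m0 :: rest)) ([], 0, m0)

lemma Afold_one (m0 : Int) (rest : List Int) : Afold m0 rest 1 = ([0], [m0]) := by
  simp [Afold, PySem.List.pyRange_one_eq_nil (le_refl (1 : Int))]

lemma Bfold_one (tt : List String) (m0 : Int) (rest : List Int) :
    Bfold tt m0 rest 1 = ([], 0, m0) := by
  simp [Bfold, PySem.List.pyRange_one_eq_nil (le_refl (1 : Int))]

lemma Afold_succ (m0 : Int) (rest : List Int) (k : Nat) (hk : 1 ≤ k) :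
    Afold m0 rest (k + 1) = stepA (m0 :: rest) (Afold m0 rest k) (k : Int) := by
  unfold Afold
  have hc : ((k + 1 : Nat) : Int) = (k : Int) + 1 := by push_cast; ring
  rw [hc, PySem.List.pyRange_one_succ_right (by exact_mod_cast hk), List.foldl_append]
  rfl

lemma Bfold_succ (tt : List String) (m0 : Int) (rest : List Int) (k : Nat) (hk : 1 ≤ k) :
    Bfold tt m0 rest (k + 1) = stepB tt (m0 :: rest) (Bfold tt m0 rest k) (k : Int) := by
  unfold Bfold
  have hc : ((k + 1 : Nat) : Int) = (k : Int) + 1 := by push_cast; ring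
  rw [hc, PySem.List.pyRange_one_succ_right (by exact_mod_cast hk), List.foldl_append]
  rfl

-- The loop invariant relating A's breakpoint tables to B's (segments, start, current).
lemma loop_invariant (tt : List String) (m0 : Int) (rest : List Int) :
    ∀ (k : Nat), 1 ≤ k → k ≤ (m0 :: rest).length →
    (Afold m0 rest k).1.length = (Afold m0 rest k).2.length ∧
    (Afold m0 rest k).1 ≠ [] ∧
    (∀ x ∈ (Afold m0 rest k).1, 0 ≤ x ∧ x < (k : Int)) ∧
    (m0 :: rest).getD (k - 1) 0 = (Bfold tt m0 rest k).2.2 ∧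
    (∀ e : Int, zipSegs tt ((Afold m0 rest k).1 ++ [e]) (Afold m0 rest k).2
        = (Bfold tt m0 rest k).1
            ++ [(PySem.List.slice tt (some (Bfold tt m0 rest k).2.1) (some e),
                 (Bfold tt m0 rest k).2.2)]) := by
  intro k hk
  induction k, hk using Nat.le_induction with
  | base =>
    intro _
    rw [Afold_one, Bfold_one]
    refine ⟨rfl, by simp, by simp, by simp, ?_⟩
    intro e
    simp [zipSegs]
  | succ k hk ih =>
    intro hkn
    obtain ⟨ih1, ih2, ih3, ih4, ih5⟩ := ih (by omega)
    rw [Afold_succ m0 rest k hk, Bfold_succ tt m0 rest k hk]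
    simp only [stepA, stepB]
    have hgk1 : PySem.List.pyGetD (m0 :: rest) ((k : Int) - 1) 0 = (m0 :: rest).getD (k - 1) 0 := by
      have hcast : ((k : Int) - 1) = ((k - 1 : Nat) : Int) := by omega
      rw [hcast, PySem.List.pyGetD_natCast]
    by_cases hc : PySem.List.pyGetD (m0 :: rest) (k : Int) 0 = (Bfold tt m0 rest k).2.2
    · have hQ : ¬ (PySem.List.pyGetD (m0 :: rest) (k : Int) 0 ≠ (Bfold tt m0 rest k).2.2) :=
        not_not_intro hc
      have hP : ¬ (PySem.List.pyGetD (m0 :: rest) (k : Int) 0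
          ≠ PySem.List.pyGetD (m0 :: rest) ((k : Int) - 1) 0) := by
        rw [hgk1, ih4]; exact hQ
      rw [if_neg hP, if_neg hQ]
      refine ⟨ih1, ih2, ?_, ?_, ih5⟩
      · intro x hx
        obtain ⟨hx1, hx2⟩ := ih3 x hx
        exact ⟨hx1, by push_cast; omega⟩
      · rw [show k + 1 - 1 = k from rfl, ← PySem.List.pyGetD_natCast]
        exact hc
    · have hQ : PySem.List.pyGetD (m0 :: rest) (k : Int) 0 ≠ (Bfold tt m0 rest k).2.2 := hc
      have hP : PySem.List.pyGetD (m0 :: rest) (k : Int) 0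
          ≠ PySem.List.pyGetD (m0 :: rest) ((k : Int) - 1) 0 := by
        rw [hgk1, ih4]; exact hQ
      rw [if_pos hP, if_pos hQ]
      dsimp only
      refine ⟨by simp [ih1], by simp, ?_, ?_, ?_⟩
      · intro x hx
        simp only [List.mem_append, List.mem_singleton] at hx
        rcases hx with hx | rfl
        · obtain ⟨hx1, hx2⟩ := ih3 x hx
          exact ⟨hx1, by omega⟩
        · exact ⟨by positivity, by push_cast; omega⟩
      · rw [Nat.add_sub_cancel, PySem.List.pyGetD_natCast]
      · intro e
        rw [zipSegs_snoc tt (Afold m0 rest k).1 (Afold m0 rest k).2 ih1 (k : Int) e _,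
          ih5 (k : Int)]

-- The ports, rewritten through the named loop bodies (definitional).
lemma portA_eq (tt : List String) (m0 : Int) (rest : List Int) :
    create_text_segment tt (m0 :: rest) =
      finalFold tt
        (if PySem.List.pyGetD (Afold m0 rest (m0 :: rest).length).1 (-1) 0
              ≠ (((m0 :: rest).length : Nat) : Int) then
           (Afold m0 rest (m0 :: rest).length).1 ++ [(((m0 :: rest).length : Nat) : Int)]
         else (Afold m0 rest (m0 :: rest).length).1)
        (Afold m0 rest (m0 :: rest).length).2 := rfl

lemma portB_eq (tt : List String) (m0 : Int) (rest : List Int) :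
    create_text_segment_alt tt (m0 :: rest) =
      (Bfold tt m0 rest (m0 :: rest).length).1
        ++ [(PySem.List.slice tt (some (Bfold tt m0 rest (m0 :: rest).length).2.1)
               (some (((m0 :: rest).length : Nat) : Int)),
             (Bfold tt m0 rest (m0 :: rest).length).2.2)] := rfl

-- ===== VERDICT (by name: the statement is the Claim_ definition above) =====
theorem create_text_segment_spec : Claim_equal_create_text_segment := by
  intro tt mask _ hpre
  unfold Spec_create_text_segment
  rcases mask with _ | ⟨m0, rest⟩
  · simp [Pre_create_text_segment] at hpre
  · obtain ⟨h1, h2, h3, h4, h5⟩ :=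
      loop_invariant tt m0 rest (m0 :: rest).length (by simp) (le_refl _)
    have har : PySem.List.pyGetD (Afold m0 rest (m0 :: rest).length).1 (-1) 0
        ≠ (((m0 :: rest).length : Nat) : Int) := by
      rw [PySem.List.pyGetD_neg_one _ _ h2]
      exact ne_of_lt ((h3 _ (List.getLast_mem h2)).2)
    rw [portA_eq, portB_eq, if_pos har,
      final_loop_eq tt _ _
        (by simp only [List.length_append, List.length_singleton, h1]),
      ← h5 (((m0 :: rest).length : Nat) : Int)]
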